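-- pv_equiv track=rewrite | github.com/YvanDevTech/App-for-Poll | polls/utils.py | kmax_schulze_method
-- ===== SOURCE A (Python) =====
-- def kmax_schulze_method(voti):
--     num_candidati = len(voti)
--
--     # Inizializza la matrice delle preferenze pairwise
--     preferenze_pairwise = [[0] * num_candidati for _ in range(num_candidati)]
--
--     # Calcola la matrice delle preferenze pairwise
--     for i in range(num_candidati):
--         for j in range(i + 1, num_candidati):
--             preferenze_pairwise[i][j] = voti[i][j]
--
--     # Calcola il Quoziente di Schulze per ciascun candidato
--     K_massimi = [max(preferenze_pairwise[i]) for i in range(num_candidati)]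
--
--     return K_massimi
-- ===== SOURCE B (Python) =====
-- def kmax_schulze_method(voti):
--     # column-major sweep: walk columns left to right, pushing each entry voti[i][j]
--     # (i < j) into an array of running per-row maxima seeded with 0
--     n = len(voti)
--     out = [0] * n
--     for j in range(n):
--         for i in range(j):
--             x = voti[i][j]
--             if x > out[i]:
--                 out[i] = x
--     return out
-- ===== Notes on version B (the rewrite author's own statement) =====
-- stated objective: alternative
-- what changed: B traverses the matrix in the transposed (column-major) order, sweeping columns left to right and updating an array of running per-row maxima in place, instead of A's two row-wise phases (build the full n-by-n pairwise matrix, then take the max of every row); no pairwise matrix or row slice is ever materialized.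
import Mathlib
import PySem

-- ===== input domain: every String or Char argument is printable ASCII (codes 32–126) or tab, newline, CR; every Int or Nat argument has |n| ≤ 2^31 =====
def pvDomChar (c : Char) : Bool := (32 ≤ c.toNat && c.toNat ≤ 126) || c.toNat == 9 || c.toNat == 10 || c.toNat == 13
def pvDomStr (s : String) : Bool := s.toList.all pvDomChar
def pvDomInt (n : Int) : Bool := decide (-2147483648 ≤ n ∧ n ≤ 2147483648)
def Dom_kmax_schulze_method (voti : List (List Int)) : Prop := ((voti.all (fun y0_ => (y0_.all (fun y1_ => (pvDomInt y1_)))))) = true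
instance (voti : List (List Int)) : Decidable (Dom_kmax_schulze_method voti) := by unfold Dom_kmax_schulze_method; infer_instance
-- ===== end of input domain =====

-- B replaces A's two row-wise phases (build the full n×n pairwise matrix, then max of each
-- row) by a column-major sweep updating an array of running per-row maxima (seed 0).

-- ===== PORT A =====
-- helper: the body of A's inner 'for j' loop, preferenze_pairwise[i][j] = voti[i][j]
-- (indices i, j are in range on every input Pre_ admits, so getD reads the actual entry)
def pvRowStep (voti : List (List Int)) (i : Nat) (pp : List (List Int)) (j : Nat) : List (List Int) :=
  pp.set i ((pp.getD i []).set j ((voti.getD i []).getD j 0))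

-- helper: A's inner loop 'for j in range(i+1, num_candidati)'
def pvFillRow (voti : List (List Int)) (n : Nat) (pp : List (List Int)) (i : Nat) : List (List Int) :=
  (List.range' (i+1) (n - (i+1))).foldl (pvRowStep voti i) pp

def kmax_schulze_method (voti : List (List Int)) : List Int :=
  let n := voti.length
  let pp := (List.range n).foldl (pvFillRow voti n)
              ((List.range n).map (fun _ => List.replicate n (0 : Int)))
  -- max(preferenze_pairwise[i]); the row is nonempty for every i < n, so getD 0 never fires
  (List.range n).map (fun i => (PySem.List.max? (pp.getD i []) (fun y => y)).getD 0)

-- ===== PORT B =====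
-- helper: body of B's inner 'for i' loop: x = voti[i][j]; if x > out[i]: out[i] = x
-- (on inputs Pre_ admits both indices are in range, so getD reads the actual entry)
def pvColUpd (voti : List (List Int)) (j : Nat) (o : List Int) (i : Nat) : List Int :=
  if (voti.getD i []).getD j 0 > o.getD i 0 then o.set i ((voti.getD i []).getD j 0) else o

-- helper: B's inner loop 'for i in range(j)'
def pvColPass (voti : List (List Int)) (o : List Int) (j : Nat) : List Int :=
  (List.range j).foldl (pvColUpd voti j) o

def kmax_schulze_method_alt (voti : List (List Int)) : List Int :=
  let n := voti.length
  (List.range n).foldl (pvColPass voti) (List.replicate n (0 : Int))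

-- ===== PRECONDITION & SPEC =====
-- Pre_ excludes exactly the inputs on which the Python A raises IndexError: some row i with
-- i+1 < len(voti) shorter than len(voti) (A reads voti[i][j] for j up to len(voti)-1).
def Pre_kmax_schulze_method (voti : List (List Int)) : Prop :=
  ∀ i < voti.length, i + 1 < voti.length → voti.length ≤ (voti.getD i []).length
instance (voti : List (List Int)) : Decidable (Pre_kmax_schulze_method voti) := by
  unfold Pre_kmax_schulze_method; infer_instance

def pvWitness_kmax_schulze_method : List (List Int) := [[0, 5], [0, 0]]

def Spec_kmax_schulze_method (voti : List (List Int)) (out : List Int) : Prop :=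
  out = kmax_schulze_method_alt voti
instance (voti : List (List Int)) (out : List Int) : Decidable (Spec_kmax_schulze_method voti out) := by
  unfold Spec_kmax_schulze_method; infer_instance

-- ===== CLAIM (what is proved, stated in full; the proofs are below) =====
def Claim_equal_kmax_schulze_method : Prop := ∀ (voti : List (List Int)), Dom_kmax_schulze_method voti → Pre_kmax_schulze_method voti → Spec_kmax_schulze_method voti (kmax_schulze_method voti)

-- ===== LEMMAS AND PROOFS =====

-- ---- A side ----

-- writing voti[i][j] into row i then rereading row i: the inner j-loop only edits row i
theorem pvFillRow_fused (voti : List (List Int)) (i : Nat) :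
    ∀ (js : List Nat) (pp : List (List Int)), i < pp.length →
      js.foldl (pvRowStep voti i) pp
        = pp.set i (js.foldl (fun r j => r.set j ((voti.getD i []).getD j 0)) (pp.getD i [])) := by
  intro js
  induction js with
  | nil =>
    intro pp hlen
    simp [List.getD_eq_getElem?_getD, List.getElem?_eq_getElem hlen]
  | cons j js ih =>
    intro pp hlen
    have hlen' : i < (pvRowStep voti i pp j).length := by
      simpa [pvRowStep] using hlen
    rw [List.foldl_cons, ih _ hlen']
    simp [pvRowStep, List.set_set, List.getD_eq_getElem?_getD, hlen]

-- the outer i-loop: row k of the final matrix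
theorem pvFill_getD (voti : List (List Int)) (n k : Nat) :
    ∀ (is : List Nat) (pp : List (List Int)), is.Nodup → (∀ i ∈ is, i < pp.length) → k < pp.length →
      ((is.foldl (pvFillRow voti n) pp).getD k [])
        = if k ∈ is then
            (List.range' (k+1) (n - (k+1))).foldl
              (fun r j => r.set j ((voti.getD k []).getD j 0)) (pp.getD k [])
          else pp.getD k [] := by
  intro is
  induction is with
  | nil => intro pp _ _ _; simp
  | cons i is ih =>
    intro pp hnd hmem hk
    have hi : i < pp.length := hmem i (by simp)
    rw [List.foldl_cons]
    rw [show pvFillRow voti n pp i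
          = pp.set i ((List.range' (i+1) (n - (i+1))).foldl
              (fun r j => r.set j ((voti.getD i []).getD j 0)) (pp.getD i []))
        from pvFillRow_fused voti i _ pp hi]
    rw [ih _ (List.Nodup.of_cons hnd) (by intro x hx; simpa using hmem x (by simp [hx])) (by simpa using hk)]
    by_cases hki : k = i
    · subst hki
      have hnotmem : k ∉ is := (List.nodup_cons.mp hnd).1
      simp [hnotmem, List.getD_eq_getElem?_getD, hk]
    · by_cases hkm : k ∈ is
      · simp [hkm, List.getD_eq_getElem?_getD, List.getElem?_set_ne (fun h => hki h.symm)]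
      · have : k ∉ i :: is := by simp [hkm, hki]
        simp [hkm, this, List.getD_eq_getElem?_getD, List.getElem?_set_ne (fun h => hki h.symm)]

theorem pvTakeSetEq (r : List Int) (m : Nat) (a : Int) :
    (r.set m a).take m = r.take m := by
  apply List.ext_getElem
  · simp
  · intro i h1 h2
    have him : i < m := by simp at h1; omega
    simp only [List.getElem_take]
    exact List.getElem_set_ne (Nat.ne_of_gt him) _

theorem pvTakeSuccSet (r : List Int) (m : Nat) (a : Int) (h : m < r.length) :
    (r.set m a).take (m+1) = r.take m ++ [a] := by
  rw [List.take_add_one, pvTakeSetEq]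
  simp [h]

-- filling positions m..len-1 of a row by index
theorem pvSetSeq (v : Nat → Int) :
    ∀ (d : Nat) (m : Nat) (r : List Int), r.length - m = d →
      (List.range' m d).foldl (fun r' j => r'.set j (v j)) r
        = r.take m ++ (List.range' m d).map v := by
  intro d
  induction d with
  | zero =>
    intro m r h
    have hle : r.length ≤ m := by omega
    simp [List.take_of_length_le hle]
  | succ d ih =>
    intro m r h
    have hm : m < r.length := by omega
    rw [List.range'_succ, List.foldl_cons,
        ih (m+1) (r.set m (v m)) (by simp; omega), pvTakeSuccSet r m (v m) hm]
    simp

theorem pvFoldMax_zero_replicate (k : Nat) : (List.replicate k (0 : Int)).foldl max 0 = 0 := by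
  induction k with
  | zero => rfl
  | succ k ih => simpa [List.replicate_succ] using ih

-- ---- B side ----

theorem pvColUpd_length (voti : List (List Int)) (j : Nat) (o : List Int) (i : Nat) :
    (pvColUpd voti j o i).length = o.length := by
  unfold pvColUpd; split <;> simp

theorem pvColFold_length (voti : List (List Int)) (j : Nat) :
    ∀ (is : List Nat) (o : List Int), (is.foldl (pvColUpd voti j) o).length = o.length := by
  intro is
  induction is with
  | nil => intro o; rfl
  | cons i is ih => intro o; rw [List.foldl_cons, ih, pvColUpd_length]

-- the inner i-loop of a column only touches the indices it visits, each at most once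
theorem pvColFold_getD (voti : List (List Int)) (j k : Nat) :
    ∀ (is : List Nat) (o : List Int), is.Nodup → k < o.length →
      ((is.foldl (pvColUpd voti j) o).getD k 0)
        = if k ∈ is then
            (if (voti.getD k []).getD j 0 > o.getD k 0 then (voti.getD k []).getD j 0
             else o.getD k 0)
          else o.getD k 0 := by
  intro is
  induction is with
  | nil => intro o _ _; simp
  | cons i is ih =>
    intro o hnd hk
    rw [List.foldl_cons, ih _ (List.Nodup.of_cons hnd) (by rw [pvColUpd_length]; exact hk)]
    by_cases hki : k = i
    · subst hki
      have hnotmem : k ∉ is := (List.nodup_cons.mp hnd).1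
      simp only [hnotmem, if_false, List.mem_cons, true_or, if_true]
      unfold pvColUpd
      split
      · simp [List.getD_eq_getElem?_getD, hk]
      · rfl
    · have hgd : (pvColUpd voti j o i).getD k 0 = o.getD k 0 := by
        unfold pvColUpd
        split
        · simp [List.getD_eq_getElem?_getD, List.getElem?_set_ne (fun h => hki h.symm)]
        · rfl
      rw [hgd]
      by_cases hkm : k ∈ is <;> simp [hkm, hki]

theorem pvColPass_length (voti : List (List Int)) (o : List Int) (j : Nat) :
    (pvColPass voti o j).length = o.length := by
  unfold pvColPass; rw [pvColFold_length]

theorem pvCols_length (voti : List (List Int)) :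
    ∀ (js : List Nat) (o : List Int), (js.foldl (pvColPass voti) o).length = o.length := by
  intro js
  induction js with
  | nil => intro o; rfl
  | cons j js ih => intro o; rw [List.foldl_cons, ih, pvColPass_length]

-- the outer j-loop: entry k accumulates exactly the columns j with k < j
theorem pvCols_getD (voti : List (List Int)) (k : Nat) :
    ∀ (js : List Nat) (o : List Int), k < o.length →
      ((js.foldl (pvColPass voti) o).getD k 0)
        = (js.filter (fun j => decide (k < j))).foldl
            (fun m j => if (voti.getD k []).getD j 0 > m then (voti.getD k []).getD j 0 else m)
            (o.getD k 0) := by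
  intro js
  induction js with
  | nil => intro o _; simp
  | cons j js ih =>
    intro o hk
    have hlen : k < (pvColPass voti o j).length := by
      unfold pvColPass; rw [pvColFold_length]; exact hk
    rw [List.foldl_cons, ih _ hlen]
    have hcp : (pvColPass voti o j).getD k 0
        = if k < j then
            (if (voti.getD k []).getD j 0 > o.getD k 0 then (voti.getD k []).getD j 0
             else o.getD k 0)
          else o.getD k 0 := by
      unfold pvColPass
      rw [pvColFold_getD voti j k (List.range j) o List.nodup_range hk]
      simp [List.mem_range]
    rw [hcp]
    by_cases hkj : k < j
    · simp [hkj]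
    · simp [hkj]

theorem pvFilterRange (k : Nat) :
    ∀ n : Nat, (List.range n).filter (fun j => decide (k < j)) = List.range' (k+1) (n - (k+1)) := by
  intro n
  induction n with
  | zero => simp
  | succ n ih =>
    rw [List.range_succ, List.filter_append, ih]
    by_cases hkn : k < n
    · have h1 : n - (k+1) + 1 = n + 1 - (k+1) := by omega
      have h2 : k + 1 + (n - (k+1)) = n := by omega
      simp only [List.filter_cons, List.filter_nil, decide_eq_true_eq, hkn, if_pos]
      rw [← h1, List.range'_1_concat, h2]
    · have h1 : n - (k+1) = 0 := by omega
      have h2 : n + 1 - (k+1) = 0 := by omega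
      simp [hkn, h1, h2]

theorem pvIfMax_fold (v : Nat → Int) (l : List Nat) (a : Int) :
    l.foldl (fun m j => if v j > m then v j else m) a = (l.map v).foldl max a := by
  rw [List.foldl_map]
  congr 1
  funext m j
  simp only [max_def]
  split_ifs <;> omega

-- ===== VERDICT (by name: the statement is the Claim_ definition above) =====
theorem kmax_schulze_method_spec : Claim_equal_kmax_schulze_method := by
  unfold Claim_equal_kmax_schulze_method
  intro voti _ _
  unfold Spec_kmax_schulze_method kmax_schulze_method kmax_schulze_method_alt
  apply List.ext_getElem
  · simp [pvCols_length]
  · intro k h1 h2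
    have hk : k < voti.length := by simpa using h1
    simp only [List.getElem_map, List.getElem_range]
    -- A side: row k of the filled matrix
    rw [pvFill_getD voti voti.length k (List.range voti.length) _
          (List.nodup_range) (by intro i hi; simpa using hi) (by simpa using hk)]
    simp only [List.mem_range.mpr hk, if_pos]
    have hpp0 : (((List.range voti.length).map
        (fun _ => List.replicate voti.length (0:Int))).getD k [])
        = List.replicate voti.length (0:Int) := by
      rw [List.getD_eq_getElem _ _ (by simpa using hk)]
      simp
    rw [hpp0, pvSetSeq _ (voti.length - (k+1)) (k+1) _ (by simp),
        List.take_replicate]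
    have hmin : min (k+1) voti.length = k + 1 := by omega
    rw [hmin, List.replicate_succ]
    simp only [List.cons_append, PySem.List.max?_id_cons, Option.getD_some, List.foldl_append]
    rw [pvFoldMax_zero_replicate]
    -- B side: the accumulator sweep yields the same fold over the same columns
    have hB : ((List.range voti.length).foldl (pvColPass voti)
          (List.replicate voti.length (0:Int)))[k] =
        ((List.range voti.length).foldl (pvColPass voti)
          (List.replicate voti.length (0:Int))).getD k 0 := by
      rw [List.getD_eq_getElem _ _ (by simpa [pvCols_length] using h2)]
    rw [hB, pvCols_getD voti k (List.range voti.length) _ (by simpa using hk),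
        pvFilterRange k voti.length, pvIfMax_fold]
    simp
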